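-- pv_equiv track=rewrite | github.com/CallBridge/comp9021-review | labs/merging_strings.py | try_execute
-- ===== SOURCE A (Python) =====
-- def try_execute(first,second,third):
--     last_index=0
--     while first!='':
--         try:
--             char = first[0]
--             first=first[1:]
--             index = third.index(char)
--             third=third[:index]+third[index+1:]
--         except:
--             return False
--     else:
--         if third==second:
--             return True
--         else:
--             return False
-- ===== SOURCE B (Python) =====
-- def try_execute(first, second, third):
--     need = {}
--     for c in first:
--         need[c] = need.get(c, 0) + 1
--     out = []
--     matched = 0
--     for c in third:
--         if need.get(c, 0) > 0:
--             need[c] = need[c] - 1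
--             matched += 1
--         else:
--             out.append(c)
--     return matched == len(first) and ''.join(out) == second
-- ===== Notes on version B (the rewrite author's own statement) =====
-- stated objective: faster
-- what changed: Replaces the per-character third.index + slice-rebuild loop (quadratic) with a character counter over first and one linear scan of third that skips counted characters, so no string is ever rebuilt.
import Mathlib
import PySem

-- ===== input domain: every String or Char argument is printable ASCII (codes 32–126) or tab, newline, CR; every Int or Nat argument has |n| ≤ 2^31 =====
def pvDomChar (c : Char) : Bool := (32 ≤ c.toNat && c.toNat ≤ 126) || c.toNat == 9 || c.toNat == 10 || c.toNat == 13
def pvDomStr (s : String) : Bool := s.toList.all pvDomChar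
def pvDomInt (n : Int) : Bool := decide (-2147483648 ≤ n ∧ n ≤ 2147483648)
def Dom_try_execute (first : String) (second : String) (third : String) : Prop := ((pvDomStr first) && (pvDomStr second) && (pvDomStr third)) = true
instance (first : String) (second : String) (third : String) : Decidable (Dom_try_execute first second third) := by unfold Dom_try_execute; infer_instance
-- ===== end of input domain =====

-- B replaces A's per-character third.index + slice-rebuild loop with a character counter
-- over `first` and a single scan of `third` (objective: faster).


-- ===== PORT A =====
-- the while-loop of A: consume `first` one char at a time; third.index(char)
-- (exception caught → False), then third = third[:index] + third[index+1:]
def try_execute_go (first third second : List Char) : Bool :=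
  match first with
  | [] => third == second
  | ch :: rest =>
    match PySem.List.index? third ch with
    | none => false
    | some i =>
      try_execute_go rest
        (PySem.List.slice third none (some (i : Int)) ++
         PySem.List.slice third (some ((i : Int) + 1)) none) second

def try_execute (first : String) (second : String) (third : String) : Bool :=
  try_execute_go first.toList third.toList second.toList

-- ===== PORT B =====
-- need[c] = need.get(c, 0) + 1 over first
def buildNeed (f : List Char) : PySem.Dict Char Int :=
  f.foldl (fun d c => d.insert c (d.getD c 0 + 1)) PySem.Dict.empty

-- one iteration of B's scan of third: state (need, out, matched)
def stepB (st : PySem.Dict Char Int × List Char × Int) (c : Char) :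
    PySem.Dict Char Int × List Char × Int :=
  if st.1.getD c 0 > 0 then (st.1.insert c (st.1.getD c 0 - 1), st.2.1, st.2.2 + 1)
  else (st.1, st.2.1 ++ [c], st.2.2)

def try_execute_alt (first : String) (second : String) (third : String) : Bool :=
  let need := buildNeed first.toList
  let st := third.toList.foldl stepB (need, [], 0)
  (st.2.2 == (first.toList.length : Int)) && (st.2.1 == second.toList)

-- ===== PRECONDITION & SPEC =====
def Spec_try_execute (first : String) (second : String) (third : String) (out : Bool) : Prop := out = try_execute_alt first second third
instance (first : String) (second : String) (third : String) (out : Bool) : Decidable (Spec_try_execute first second third out) := by unfold Spec_try_execute; infer_instance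

-- ===== CLAIM (what is proved, stated in full; the proofs are below) =====
def Claim_equal_try_execute : Prop := ∀ (first : String) (second : String) (third : String), Dom_try_execute first second third → Spec_try_execute first second third (try_execute first second third)

-- ===== LEMMAS AND PROOFS =====

-- model of A: remove the first occurrence of each char of `first` from `third`
def mA (first third second : List Char) : Bool :=
  match first with
  | [] => third == second
  | c :: r => if c ∈ third then mA r (third.erase c) second else false

-- model of B's scan, the dict abstracted to a multiplicity function
def mScan (m : Char → Nat) (t : List Char) : (Char → Nat) × List Char × Nat :=
  match t with
  | [] => (m, [], 0)
  | c :: r =>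
    if m c > 0 then
      let p := mScan (fun x => if x = c then m x - 1 else m x) r
      (p.1, p.2.1, p.2.2 + 1)
    else
      let p := mScan m r
      (p.1, c :: p.2.1, p.2.2)

def mB (f t s : List Char) : Bool :=
  ((mScan (fun x => f.count x) t).2.2 == f.length) &&
  ((mScan (fun x => f.count x) t).2.1 == s)

-- A's slice surgery at the index of c is List.erase
lemma slices_erase (t : List Char) (c : Char) (i : Nat)
    (h : PySem.List.index? t c = some i) :
    PySem.List.slice t none (some (i : Int)) ++
      PySem.List.slice t (some ((i : Int) + 1)) none = t.erase c := by
  obtain ⟨pre, suf, rfl, hlen, hnot⟩ := (PySem.List.index?_eq_some_iff t c i).1 h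
  have h1 : PySem.List.slice (pre ++ c :: suf) none (some (i : Int)) = pre := by
    rw [PySem.List.slice_to_natCast, ← hlen, List.take_left]
  have h2 : PySem.List.slice (pre ++ c :: suf) (some ((i : Int) + 1)) none = suf := by
    have hc : ((i : Int) + 1) = ((i + 1 : Nat) : Int) := by push_cast; ring
    rw [hc, PySem.List.slice_from_natCast, ← hlen]
    simp [List.drop_append]
  rw [h1, h2, List.erase_append_right _ (by simpa using hnot)]
  simp

lemma A_eq_mA (f : List Char) : ∀ t s, try_execute_go f t s = mA f t s := by
  induction f with
  | nil => intro t s; rfl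
  | cons c r ih =>
    intro t s
    cases hidx : PySem.List.index? t c with
    | none =>
      have hmem : c ∉ t := (PySem.List.index?_eq_none_iff t c).1 hidx
      show (match PySem.List.index? t c with
        | none => false
        | some i => try_execute_go r
            (PySem.List.slice t none (some (i : Int)) ++
             PySem.List.slice t (some ((i : Int) + 1)) none) s) = mA (c :: r) t s
      rw [hidx]
      simp [mA, hmem]
    | some i =>
      have hmem : c ∈ t := (PySem.List.index?_isSome_iff t c).1 (by rw [hidx]; rfl)
      show (match PySem.List.index? t c with
        | none => false
        | some i => try_execute_go r
            (PySem.List.slice t none (some (i : Int)) ++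
             PySem.List.slice t (some ((i : Int) + 1)) none) s) = mA (c :: r) t s
      rw [hidx]
      show try_execute_go r _ s = mA (c :: r) t s
      rw [slices_erase t c i hidx, ih]
      simp [mA, hmem]

-- the counter dict built over f holds exactly the multiplicities of f
lemma buildNeed_getD (f : List Char) :
    ∀ (d : PySem.Dict Char Int) (x : Char),
      (f.foldl (fun d c => d.insert c (d.getD c 0 + 1)) d).getD x 0
        = d.getD x 0 + (f.count x : Int) := by
  induction f with
  | nil => intro d x; simp
  | cons a f ih =>
    intro d x
    rw [List.foldl_cons, ih, PySem.Dict.getD_insert]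
    by_cases hx : x = a
    · subst hx
      have hc : (x :: f).count x = f.count x + 1 := by simp
      rw [if_pos rfl, hc]; push_cast; ring
    · have hc : (a :: f).count x = f.count x := by simp [Ne.symm hx]
      rw [if_neg hx, hc]

-- B's dict fold computes mScan's out and matched
lemma scan_fold (t : List Char) :
    ∀ (d : PySem.Dict Char Int) (m : Char → Nat) (out0 : List Char) (k0 : Int),
      (∀ x, d.getD x 0 = (m x : Int)) →
      (t.foldl stepB (d, out0, k0)).2.1 = out0 ++ (mScan m t).2.1 ∧
      (t.foldl stepB (d, out0, k0)).2.2 = k0 + ((mScan m t).2.2 : Int) := by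
  induction t with
  | nil => intro d m out0 k0 _; simp [mScan]
  | cons c r ih =>
    intro d m out0 k0 hinv
    rw [List.foldl_cons]
    by_cases hpos : m c > 0
    · have hd : d.getD c 0 > 0 := by rw [hinv c]; exact_mod_cast hpos
      have hstep : stepB (d, out0, k0) c = (d.insert c (d.getD c 0 - 1), out0, k0 + 1) := by
        simp [stepB, hd]
      have hinv' : ∀ x, (d.insert c (d.getD c 0 - 1)).getD x 0
          = ((fun x => if x = c then m x - 1 else m x) x : Int) := by
        intro x
        rw [PySem.Dict.getD_insert]
        by_cases hx : x = c
        · simp [hx, hinv c]; omega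
        · simp [hx, hinv x]
      obtain ⟨i1, i2⟩ := ih (d.insert c (d.getD c 0 - 1))
        (fun x => if x = c then m x - 1 else m x) out0 (k0 + 1) hinv'
      rw [hstep]
      constructor
      · rw [i1]; simp [mScan, hpos]
      · rw [i2]; simp [mScan, hpos]; ring
    · have hd : ¬ d.getD c 0 > 0 := by rw [hinv c]; exact_mod_cast hpos
      have hstep : stepB (d, out0, k0) c = (d, out0 ++ [c], k0) := by
        simp [stepB, hd]
      obtain ⟨i1, i2⟩ := ih d m (out0 ++ [c]) k0 hinv
      rw [hstep]
      constructor
      · rw [i1]; simp [mScan, hpos]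
      · rw [i2]; simp [mScan, hpos]

lemma B_eq_mB (first second third : String) :
    try_execute_alt first second third = mB first.toList third.toList second.toList := by
  have hinv : ∀ x, (buildNeed first.toList).getD x 0 = ((first.toList.count x : Nat) : Int) := by
    intro x
    have := buildNeed_getD first.toList PySem.Dict.empty x
    simpa [buildNeed] using this
  obtain ⟨h1, h2⟩ := scan_fold third.toList (buildNeed first.toList)
      (fun x => first.toList.count x) [] 0 hinv
  have e : try_execute_alt first second third =
      (((third.toList.foldl stepB (buildNeed first.toList, [], 0)).2.2
          == (first.toList.length : Int)) &&
       ((third.toList.foldl stepB (buildNeed first.toList, [], 0)).2.1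
          == second.toList)) := rfl
  rw [e, h1, h2]
  unfold mB
  simp only [List.nil_append, zero_add]
  congr 1
  by_cases h : (mScan (fun x => first.toList.count x) third.toList).2.2 = first.toList.length
  · simp [h]
  · simp

-- scanning with the empty multiset removes nothing
lemma mScan_zero (t : List Char) : mScan (fun _ => 0) t = ((fun _ => 0), t, 0) := by
  induction t with
  | nil => rfl
  | cons c r ih => simp [mScan, ih]

-- adding one copy of a present c to the demand consumes its first occurrence
lemma mScan_mem (c : Char) :
    ∀ (t : List Char) (m : Char → Nat), c ∈ t →
      (mScan (fun x => if x = c then m x + 1 else m x) t).2.1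
        = (mScan m (t.erase c)).2.1 ∧
      (mScan (fun x => if x = c then m x + 1 else m x) t).2.2
        = (mScan m (t.erase c)).2.2 + 1 := by
  intro t
  induction t with
  | nil => intro m h; simp at h
  | cons a r ih =>
    intro m hmem
    by_cases hac : a = c
    · subst hac
      have hfun : (fun x => if x = a then (if x = a then m x + 1 else m x) - 1
          else (if x = a then m x + 1 else m x)) = m := by
        funext x; by_cases hx : x = a <;> simp [hx]
      simp [mScan, hfun]
    · have hcr : c ∈ r := by
        rcases List.mem_cons.mp hmem with h | h
        · exact absurd h.symm hac
        · exact h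
      have herase : (a :: r).erase c = a :: r.erase c := by
        rw [List.erase_cons_tail]; simp [hac]
      rw [herase]
      by_cases hpos : m a > 0
      · have hfun : (fun x => if x = a then (if x = c then m x + 1 else m x) - 1
            else (if x = c then m x + 1 else m x))
            = (fun x => if x = c then (if x = a then m x - 1 else m x) + 1
                else (if x = a then m x - 1 else m x)) := by
          funext x
          by_cases h1 : x = a <;> by_cases h2 : x = c <;>
            simp_all
        have := ih (fun x => if x = a then m x - 1 else m x) hcr
        simp only [mScan, hac, hpos, if_pos, hfun]
        simp [hpos, this.1, this.2]
      · have := ih m hcr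
        simp only [mScan, hac, hpos]
        simp [hpos, this.1, this.2]

-- a demanded char absent from t changes nothing in the scan
lemma mScan_not_mem (c : Char) :
    ∀ (t : List Char) (m : Char → Nat), c ∉ t →
      (mScan (fun x => if x = c then m x + 1 else m x) t).2.1 = (mScan m t).2.1 ∧
      (mScan (fun x => if x = c then m x + 1 else m x) t).2.2 = (mScan m t).2.2 := by
  intro t
  induction t with
  | nil => intro m _; simp [mScan]
  | cons a r ih =>
    intro m hmem
    have hac : a ≠ c := by rintro rfl; exact hmem (List.mem_cons_self)
    have hcr : c ∉ r := fun h => hmem (List.mem_cons_of_mem a h)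
    have hval : (if a = c then m a + 1 else m a) = m a := by simp [hac]
    by_cases hpos : m a > 0
    · have hfun : (fun x => if x = a then (if x = c then m x + 1 else m x) - 1
          else (if x = c then m x + 1 else m x))
          = (fun x => if x = c then (if x = a then m x - 1 else m x) + 1
              else (if x = a then m x - 1 else m x)) := by
        funext x
        by_cases h1 : x = a <;> by_cases h2 : x = c <;> simp_all
      have := ih (fun x => if x = a then m x - 1 else m x) hcr
      simp only [mScan, hval, hpos, if_pos, hfun]
      simp [this.1, this.2]
    · have := ih m hcr
      simp only [mScan, hval, hpos]
      simp [this.1, this.2]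

-- the scan never matches more chars than f supplies
lemma mScan_matched_le : ∀ (t f : List Char),
    (mScan (fun x => f.count x) t).2.2 ≤ f.length := by
  intro t
  induction t with
  | nil => intro f; simp [mScan]
  | cons a r ih =>
    intro f
    by_cases hpos : f.count a > 0
    · have hmem : a ∈ f := List.count_pos_iff.mp hpos
      have hfun : (fun x => if x = a then f.count x - 1 else f.count x)
          = (fun x => (f.erase a).count x) := by
        funext x
        by_cases hx : x = a
        · simp [hx, List.count_erase_self]
        · simp [hx, List.count_erase_of_ne hx]
      simp only [mScan, hpos, if_pos, hfun]
      have := ih (f.erase a)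
      have hlen : (f.erase a).length = f.length - 1 := List.length_erase_of_mem hmem
      have hfl : 1 ≤ f.length := List.length_pos_of_mem hmem
      omega
    · simp only [mScan, hpos]
      exact ih f

-- counting a cons bumps the multiplicity function at its head
lemma count_cons_fun (c : Char) (r : List Char) :
    (fun x => (c :: r).count x) = (fun x => if x = c then r.count x + 1 else r.count x) := by
  funext x
  by_cases hx : x = c
  · simp [hx]
  · simp [hx, Ne.symm hx]

lemma mA_eq_mB (f : List Char) : ∀ t s, mA f t s = mB f t s := by
  induction f with
  | nil =>
    intro t s
    have hz : (fun x => ([] : List Char).count x) = (fun _ => 0) := by funext x; simp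
    unfold mB
    rw [hz, mScan_zero]
    simp [mA]
  | cons c r ih =>
    intro t s
    by_cases hmem : c ∈ t
    · obtain ⟨h1, h2⟩ := mScan_mem c t (fun x => r.count x) hmem
      have hA : mA (c :: r) t s = mB r (t.erase c) s := by
        rw [show mA (c :: r) t s = mA r (t.erase c) s from by simp [mA, hmem]]
        exact ih _ _
      have hB : mB (c :: r) t s = mB r (t.erase c) s := by
        unfold mB
        rw [count_cons_fun, h1, h2, List.length_cons]
        congr 1
        by_cases h : (mScan (fun x => r.count x) (t.erase c)).2.2 = r.length
        · simp [h]
        · simp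
      rw [hA, hB]
    · obtain ⟨h1, h2⟩ := mScan_not_mem c t (fun x => r.count x) hmem
      have hle := mScan_matched_le t r
      have hne : ((mScan (fun x => (c :: r).count x) t).2.2 == (c :: r).length) = false := by
        rw [count_cons_fun, h2]
        simp only [List.length_cons, beq_eq_false_iff_ne, ne_eq]
        omega
      have hA : mA (c :: r) t s = false := by simp [mA, hmem]
      have hB : mB (c :: r) t s = false := by
        unfold mB
        rw [hne, Bool.false_and]
      rw [hA, hB]

-- ===== VERDICT (by name: the statement is the Claim_ definition above) =====
theorem try_execute_spec : Claim_equal_try_execute := by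
  intro first second third _
  show try_execute first second third = try_execute_alt first second third
  rw [try_execute, A_eq_mA, B_eq_mB, mA_eq_mB]
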